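-- pv_equiv track=rewrite | github.com/JakeSaunders1995/comp16321MarkingMid | CW_rugby/rugby_v79907sy.py | scoreAddition
-- ===== SOURCE A (Python) =====
-- def scoreAddition(team_score):
-- 	score = 0
-- 	for i in team_score:
-- 		if i == "t":
-- 			score += 5
-- 		elif i == "c":
-- 			score += 2
-- 		elif i == "p":
-- 			score += 3
-- 		elif i == "d":
-- 			score += 3
-- 	return score
-- ===== SOURCE B (Python) =====
-- def scoreAddition(team_score):
--     weights = {"t": 5, "c": 2, "p": 3, "d": 3}
--
--     def total(seg):
--         if not seg:
--             return 0
--         if len(seg) == 1: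
--             return weights.get(seg[0], 0)
--         mid = len(seg) // 2
--         return total(seg[:mid]) + total(seg[mid:])
--
--     return total(team_score)
-- ===== Notes on version B (the rewrite author's own statement) =====
-- stated objective: alternative
-- what changed: Replaces the single-pass accumulator loop with an if/elif dispatch by a divide-and-conquer recursion that splits the list in halves and combines subtotals, weighting single elements through a lookup table.
import Mathlib
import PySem

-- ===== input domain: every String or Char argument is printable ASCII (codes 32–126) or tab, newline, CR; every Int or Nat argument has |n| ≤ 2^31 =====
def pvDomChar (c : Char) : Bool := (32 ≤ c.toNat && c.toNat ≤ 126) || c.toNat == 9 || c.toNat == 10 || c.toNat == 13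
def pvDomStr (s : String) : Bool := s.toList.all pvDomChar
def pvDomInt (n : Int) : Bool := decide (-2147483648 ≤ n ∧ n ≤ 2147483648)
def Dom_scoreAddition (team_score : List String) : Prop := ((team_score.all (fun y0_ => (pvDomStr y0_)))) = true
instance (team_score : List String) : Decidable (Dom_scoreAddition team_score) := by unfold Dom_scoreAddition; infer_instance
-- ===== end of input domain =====

-- B replaces the accumulator loop with a divide-and-conquer recursion over list halves,
-- weighting single elements through a lookup table; same values, no speed claim.

-- ===== PORT A =====
def scoreAddition (team_score : List String) : Int :=
  team_score.foldl (fun score i =>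
    if i = "t" then score + 5
    else if i = "c" then score + 2
    else if i = "p" then score + 3
    else if i = "d" then score + 3
    else score) 0

-- ===== PORT B =====
-- weights = {"t": 5, "c": 2, "p": 3, "d": 3}
def pvWeights : PySem.Dict String Int :=
  (((PySem.Dict.empty.insert "t" 5).insert "c" 2).insert "p" 3).insert "d" 3

-- total(seg): halve, recurse, add
def pvTotal (seg : List String) : Int :=
  if seg.length ≤ 1 then
    match seg with
    | [] => 0
    | x :: _ => pvWeights.getD x 0
  else
    pvTotal (seg.take (seg.length / 2)) + pvTotal (seg.drop (seg.length / 2))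
termination_by seg.length
decreasing_by
  · simp only [List.length_take]; omega
  · simp only [List.length_drop]; omega

def scoreAddition_alt (team_score : List String) : Int := pvTotal team_score

-- ===== PRECONDITION & SPEC =====
def Spec_scoreAddition (team_score : List String) (out : Int) : Prop := out = scoreAddition_alt team_score
instance (team_score : List String) (out : Int) : Decidable (Spec_scoreAddition team_score out) := by unfold Spec_scoreAddition; infer_instance

-- ===== CLAIM (what is proved, stated in full; the proofs are below) =====
def Claim_equal_scoreAddition : Prop := ∀ (team_score : List String), Dom_scoreAddition team_score → Spec_scoreAddition team_score (scoreAddition team_score)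

-- ===== LEMMAS AND PROOFS =====
def pvW (x : String) : Int := pvWeights.getD x 0

theorem pvTotal_eq_sum (xs : List String) : pvTotal xs = (xs.map pvW).sum := by
  induction xs using pvTotal.induct with
  | case1 h => rw [pvTotal]; simp
  | case2 x t h =>
    have : t = [] := by cases t with | nil => rfl | cons a b => simp at h
    subst this; rw [pvTotal]; simp [pvW]
  | case3 seg h ih1 ih2 =>
    rw [pvTotal.eq_def]
    simp only [h, if_false, ih1, ih2]
    rw [← List.sum_append, ← List.map_append, List.take_append_drop]

theorem pvW_cases (x : String) :
    pvW x = (if x = "t" then 5 else if x = "c" then 2 else if x = "p" then 3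
             else if x = "d" then 3 else 0) := by
  by_cases h1 : x = "t"
  · subst h1; rfl
  by_cases h2 : x = "c"
  · subst h2; rfl
  by_cases h3 : x = "p"
  · subst h3; rfl
  by_cases h4 : x = "d"
  · subst h4; rfl
  have t1 : ("t" == x) = false := beq_eq_false_iff_ne.mpr (fun e => h1 e.symm)
  have t2 : ("c" == x) = false := beq_eq_false_iff_ne.mpr (fun e => h2 e.symm)
  have t3 : ("p" == x) = false := beq_eq_false_iff_ne.mpr (fun e => h3 e.symm)
  have t4 : ("d" == x) = false := beq_eq_false_iff_ne.mpr (fun e => h4 e.symm)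
  simp [pvW, pvWeights, PySem.Dict.getD, PySem.Dict.get?, PySem.Dict.insert,
    PySem.Dict.empty, List.find?, t1, t2, t3, t4, h1, h2, h3, h4]

theorem foldl_shift (xs : List String) (a : Int) :
    xs.foldl (fun score i =>
      if i = "t" then score + 5
      else if i = "c" then score + 2
      else if i = "p" then score + 3
      else if i = "d" then score + 3
      else score) a = a + (xs.map pvW).sum := by
  induction xs generalizing a with
  | nil => simp
  | cons x t ih =>
    simp only [List.foldl_cons, ih, List.map_cons, List.sum_cons, pvW_cases]
    split_ifs <;> ring

-- ===== VERDICT (by name: the statement is the Claim_ definition above) =====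
theorem scoreAddition_spec : Claim_equal_scoreAddition := by
  intro xs _
  show _ = _
  rw [scoreAddition_alt, pvTotal_eq_sum, scoreAddition, foldl_shift]
  ring
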